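-- pv_equiv track=rewrite | github.com/AmrSheta22/text-colorizer | src/app.py | index_mapping
-- ===== SOURCE A (Python) =====
-- def index_mapping(lst):
--     index_dict = {}
--     for index, value in enumerate(lst):
--         if value in index_dict:
--             index_dict[value].append(index)
--         else:
--             index_dict[value] = [index]
--     index_dict = dict(sorted(index_dict.items()))
--     return index_dict
-- ===== SOURCE B (Python) =====
-- def index_mapping(lst):
--     pairs = sorted((v, i) for i, v in enumerate(lst))
--     out = {}
--     cur_v = None
--     cur = None
--     for v, i in pairs:
--         if cur is not None and v == cur_v:
--             cur.append(i)
--         else: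
--             if cur is not None:
--                 out[cur_v] = cur
--             cur_v, cur = v, [i]
--     if cur is not None:
--         out[cur_v] = cur
--     return out
-- ===== Notes on version B (the rewrite author's own statement) =====
-- stated objective: alternative
-- what changed: Replaces the dict-membership grouping loop with a single lexicographic sort of (value, index) pairs followed by a left-to-right sweep that starts a new group whenever the value changes; no post-sort of the dict is needed.
import Mathlib
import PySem

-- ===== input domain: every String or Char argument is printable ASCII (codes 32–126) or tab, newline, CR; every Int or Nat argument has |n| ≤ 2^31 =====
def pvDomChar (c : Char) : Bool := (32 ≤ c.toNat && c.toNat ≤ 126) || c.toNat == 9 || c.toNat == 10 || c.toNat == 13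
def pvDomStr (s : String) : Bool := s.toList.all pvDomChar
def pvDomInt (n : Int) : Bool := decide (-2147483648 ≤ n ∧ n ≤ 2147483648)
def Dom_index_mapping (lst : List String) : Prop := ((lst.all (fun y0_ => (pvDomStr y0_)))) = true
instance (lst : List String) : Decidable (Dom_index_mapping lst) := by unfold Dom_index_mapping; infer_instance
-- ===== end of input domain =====

-- B replaces A's dict-membership grouping loop by a lexicographic sort of (value, index)
-- pairs followed by a one-pass sweep that opens a new group whenever the value changes
-- (objective: alternative algorithm, same result).

-- ===== PORT A =====
-- dict keys are unique, so Python's tuple sort of d.items() never compares the list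
-- components: sorting the items by their key is exact here.
def index_mapping (lst : List String) : List (String × List Int) :=
  let d := (PySem.List.enumerate lst).foldl
    (fun d p =>
      if d.contains p.2 then
        -- index_dict[value].append(index): the key is present, the default [] is never read
        d.modify p.2 [] (fun l => l ++ [p.1])
      else d.insert p.2 [p.1])
    PySem.Dict.empty
  PySem.List.sorted d.items (fun q => q.1) false

-- ===== PORT B =====
-- the loop body of Source B: state = (groups already inserted into out, current (cur_v, cur))
def pvSweepStep (st : List (String × List Int) × Option (String × List Int))
    (p : String × Int) : List (String × List Int) × Option (String × List Int) :=
  match st.2 with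
  | some (cv, cur) =>
      if p.1 = cv then (st.1, some (cv, cur ++ [p.2]))
      else (st.1 ++ [(cv, cur)], some (p.1, [p.2]))
  | none => (st.1, some (p.1, [p.2]))

def index_mapping_alt (lst : List String) : List (String × List Int) :=
  let pairs := PySem.List.sorted2
    ((PySem.List.enumerate lst).map (fun p => (p.2, p.1)))
    (fun q => q.1) (fun q => q.2) false
  let st := pairs.foldl pvSweepStep ([], none)
  match st.2 with
  | some g => st.1 ++ [g]
  | none => st.1

-- ===== PRECONDITION & SPEC =====
def Spec_index_mapping (lst : List String) (out : List (String × List Int)) : Prop := out = index_mapping_alt lst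
instance (lst : List String) (out : List (String × List Int)) : Decidable (Spec_index_mapping lst out) := by unfold Spec_index_mapping; infer_instance

-- ===== CLAIM (what is proved, stated in full; the proofs are below) =====
def Claim_equal_index_mapping : Prop := ∀ (lst : List String), Dom_index_mapping lst → Spec_index_mapping lst (index_mapping lst)

-- ===== LEMMAS AND PROOFS =====

-- the (value, index) pair list both sides group
def pvSwapped (lst : List String) : List (String × Int) :=
  (PySem.List.enumerate lst).map (fun p => (p.2, p.1))

-- the indices at which v occurs, in ascending order
def pvGrp (lst : List String) (v : String) : List Int :=
  ((pvSwapped lst).filter (fun q => q.1 == v)).map (fun q => q.2)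

-- the distinct values of lst in ascending order
def pvVals (lst : List String) : List String :=
  PySem.List.sorted (PySem.Set.ofList lst) (fun x => x) false

-- the common canonical result
def pvCanon (lst : List String) : List (String × List Int) :=
  (pvVals lst).map (fun v => (v, pvGrp lst v))

-- ---- A side ----

theorem pvStepEq (d : PySem.Dict String (List Int)) (p : Int × String) :
    (if d.contains p.2 then d.modify p.2 [] (fun l => l ++ [p.1]) else d.insert p.2 [p.1])
      = d.modify p.2 [] (fun l => l ++ [p.1]) := by
  by_cases h : d.contains p.2
  · simp [h]
  · simp only [Bool.not_eq_true] at h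
    have h2 : d.get? p.2 = none := by
      rw [PySem.Dict.get?_eq_none_iff_contains]; simp [h]
    simp [h, PySem.Dict.modify, PySem.Dict.getD, h2]

def pvDictA (lst : List String) : PySem.Dict String (List Int) :=
  (pvSwapped lst).foldl (fun d q => d.modify q.1 [] (fun l => l ++ [q.2])) PySem.Dict.empty

theorem pvMapFstSwapped (lst : List String) : (pvSwapped lst).map (fun q => q.1) = lst := by
  unfold pvSwapped
  rw [List.map_map]
  exact PySem.List.map_snd_enumerate lst 0

theorem pvSwappedSndPairwise (lst : List String) :
    (pvSwapped lst).Pairwise (fun a b => a.2 < b.2) := by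
  unfold pvSwapped
  rw [List.pairwise_map]
  exact PySem.List.pairwise_lt_enumerate lst 0

theorem pvA_dict (lst : List String) :
    index_mapping lst = PySem.List.sorted (pvDictA lst).items (fun q => q.1) false := by
  have e : pvDictA lst
      = (PySem.List.enumerate lst).foldl
          (fun d p => if d.contains p.2 then d.modify p.2 [] (fun l => l ++ [p.1])
            else d.insert p.2 [p.1]) PySem.Dict.empty := by
    unfold pvDictA pvSwapped
    rw [List.foldl_map]
    congr 1
    funext d p
    exact (pvStepEq d p).symm
  rw [index_mapping, e]

theorem pvKeysA (lst : List String) : (pvDictA lst).keys = PySem.Set.ofList lst := by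
  unfold pvDictA
  rw [PySem.Dict.keys_foldl_modify_key (pvSwapped lst) (fun q => q.1) []
    (fun d q l => l ++ [q.2]) PySem.Dict.empty]
  rw [pvMapFstSwapped]
  rfl

theorem pvNodupKeysA (lst : List String) : (pvDictA lst).keys.Nodup := by
  unfold pvDictA
  exact PySem.Dict.nodup_keys_foldl_modify_key (pvSwapped lst) (fun q => q.1) []
    (fun d q l => l ++ [q.2]) PySem.Dict.empty (by simp [PySem.Dict.empty, PySem.Dict.keys])

theorem pvGetDA (lst : List String) (v : String) : (pvDictA lst).getD v [] = pvGrp lst v := by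
  unfold pvDictA pvGrp
  rw [PySem.Dict.getD_foldl_modify_append]
  simp

theorem pvItemsA (lst : List String) :
    (pvDictA lst).items = (PySem.Set.ofList lst).map (fun v => (v, pvGrp lst v)) := by
  rw [PySem.Dict.items_eq_map_keys (pvDictA lst) (pvNodupKeysA lst) []]
  rw [pvKeysA]
  exact List.map_congr_left (fun v _ => by rw [pvGetDA])

theorem pvA_canon (lst : List String) : index_mapping lst = pvCanon lst := by
  rw [pvA_dict, pvItemsA]
  apply PySem.List.sorted_eq_of_perm_of_pairwise_lt
  · exact (PySem.List.sorted_perm (PySem.Set.ofList lst) (fun x => x) false).map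
      (fun v => (v, pvGrp lst v))
  · unfold pvCanon pvVals
    rw [List.pairwise_map]
    exact PySem.List.sorted_ofList_pairwise_lt lst

-- ---- B side ----

-- sorted2 with component keys is sorted with the lexicographic key (String ×ₗ Int)
theorem pvSorted2Lex (xs : List (String × Int)) :
    PySem.List.sorted2 xs (fun q => q.1) (fun q => q.2) false
      = PySem.List.sorted xs (fun q => (toLex (q.1, q.2) : String ×ₗ Int)) false := by
  show List.foldl (fun acc x => PySem.List.insertBy
      (fun a b : String × Int => decide (a.1 < b.1) || !decide (b.1 < a.1) && decide (a.2 < b.2)) x acc) [] xs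
    = List.foldl (fun acc x => PySem.List.insertBy
      (fun a b : String × Int => decide ((toLex (a.1, a.2) : String ×ₗ Int) < toLex (b.1, b.2))) x acc) [] xs
  congr 1
  funext acc x
  congr 1
  funext a b
  rcases lt_trichotomy a.1 b.1 with h | h | h
  · simp [Prod.Lex.lt_iff, h]
  · simp [Prod.Lex.lt_iff, h]
  · have h' : b.1.toList < a.1.toList := by rwa [String.lt_iff_toList_lt] at h
    simp only [Prod.Lex.lt_iff]
    simp [not_lt_of_gt h, h.ne']
    intro hle
    exact absurd hle (not_le_of_gt h')

def pvFlat (lst : List String) : List (String × Int) :=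
  (pvVals lst).flatMap (fun v => (pvSwapped lst).filter (fun q => q.1 == v))

theorem pvFlatMapCongr {α β : Type} (l : List α) (f g : α → List β)
    (h : ∀ x ∈ l, f x = g x) : l.flatMap f = l.flatMap g := by
  simp only [List.flatMap_def]
  rw [List.map_congr_left h]

theorem pvFlatPermGen (vs : List String) : ∀ (l : List (String × Int)), vs.Nodup →
    (∀ q ∈ l, q.1 ∈ vs) → (vs.flatMap (fun v => l.filter (fun q => q.1 == v))).Perm l := by
  induction vs with
  | nil =>
    intro l _ hc
    cases l with
    | nil => simp
    | cons q t => exact absurd (hc q (by simp)) (by simp)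
  | cons v rest ih =>
    intro l hnd hc
    simp only [List.flatMap_cons]
    have hv : v ∉ rest := (List.nodup_cons.mp hnd).1
    have hrest : rest.flatMap (fun w => l.filter (fun q => q.1 == w))
        = rest.flatMap (fun w => (l.filter (fun q => !(q.1 == v))).filter (fun q => q.1 == w)) := by
      apply pvFlatMapCongr
      intro w hw
      rw [List.filter_filter]
      apply List.filter_congr
      intro q _
      by_cases hq : q.1 = w
      · simp [hq]
        intro h
        exact hv (h ▸ hw)
      · simp [hq]
    rw [hrest]
    have hperm : (rest.flatMap (fun w =>
        (l.filter (fun q => !(q.1 == v))).filter (fun q => q.1 == w))).Perm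
          (l.filter (fun q => !(q.1 == v))) := by
      apply ih _ (List.nodup_cons.mp hnd).2
      intro q hq
      have hql : q ∈ l := List.mem_of_mem_filter hq
      have hqv : ¬ (q.1 == v) = true := by
        have := List.of_mem_filter hq
        simpa using this
      have := hc q hql
      simp only [List.mem_cons] at this
      rcases this with h | h
      · exact absurd (by simpa using h) hqv
      · exact h
    exact (hperm.append_left _).trans (List.filter_append_perm _ l)

theorem pvFlatPerm (lst : List String) : (pvFlat lst).Perm (pvSwapped lst) := by
  unfold pvFlat
  apply pvFlatPermGen
  · exact ((PySem.List.sorted_perm (PySem.Set.ofList lst) (fun x => x) false).nodup_iff).mpr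
      (PySem.Set.nodup_ofList lst)
  · intro q hq
    unfold pvVals
    rw [PySem.List.mem_sorted, PySem.Set.mem_ofList]
    rw [← pvMapFstSwapped lst]
    exact List.mem_map_of_mem hq

theorem pvValsPairwise (lst : List String) : (pvVals lst).Pairwise (· < ·) :=
  PySem.List.sorted_ofList_pairwise_lt lst

theorem pvFlatPairwise (lst : List String) :
    (pvFlat lst).Pairwise (fun a b => (toLex (a.1, a.2) : String ×ₗ Int) < toLex (b.1, b.2)) := by
  unfold pvFlat
  simp only [List.flatMap_def]
  rw [List.pairwise_flatten]
  constructor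
  · intro s hs
    simp only [List.mem_map] at hs
    obtain ⟨v, _, rfl⟩ := hs
    have hsub : ((pvSwapped lst).filter (fun q => q.1 == v)).Pairwise (fun a b => a.2 < b.2) :=
      List.Pairwise.sublist List.filter_sublist (pvSwappedSndPairwise lst)
    apply List.Pairwise.imp_of_mem ?_ hsub
    intro a b ha hb hlt
    have ha1 : a.1 = v := by simpa using List.of_mem_filter ha
    have hb1 : b.1 = v := by simpa using List.of_mem_filter hb
    rw [Prod.Lex.lt_iff]
    right
    exact ⟨ha1.trans hb1.symm, hlt⟩
  · rw [List.pairwise_map]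
    apply List.Pairwise.imp_of_mem ?_ (pvValsPairwise lst)
    intro v w _ _ hvw a ha b hb
    have ha1 : a.1 = v := by simpa using List.of_mem_filter ha
    have hb1 : b.1 = w := by simpa using List.of_mem_filter hb
    rw [Prod.Lex.lt_iff]
    left
    rw [ha1, hb1]
    exact hvw

theorem pvSortedB (lst : List String) :
    PySem.List.sorted2 (pvSwapped lst) (fun q => q.1) (fun q => q.2) false = pvFlat lst := by
  rw [pvSorted2Lex]
  exact PySem.List.sorted_eq_of_perm_of_pairwise_lt _ _ _ (pvFlatPerm lst) (pvFlatPairwise lst)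

theorem pvGroupFilter (lst : List String) (v : String) :
    (pvSwapped lst).filter (fun q => q.1 == v) = (pvGrp lst v).map (fun i => (v, i)) := by
  unfold pvGrp
  rw [List.map_map]
  conv_lhs => rw [← List.map_id ((pvSwapped lst).filter (fun q => q.1 == v))]
  apply List.map_congr_left
  intro q hq
  have h1 : q.1 = v := by simpa using List.of_mem_filter hq
  simp [Function.comp, ← h1]

-- sweeping the rest of a group only extends the current list
theorem pvSweepGroup (is : List Int) : ∀ (done : List (String × List Int)) (v : String)
    (cur : List Int),
    (is.map (fun i => (v, i))).foldl pvSweepStep (done, some (v, cur))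
      = (done, some (v, cur ++ is)) := by
  induction is with
  | nil => intro done v cur; simp
  | cons i it ih =>
    intro done v cur
    have hstep : pvSweepStep (done, some (v, cur)) (v, i) = (done, some (v, cur ++ [i])) := by
      simp [pvSweepStep]
    simp only [List.map_cons, List.foldl_cons, hstep]
    rw [ih]
    simp

def pvFinish (st : List (String × List Int) × Option (String × List Int)) :
    List (String × List Int) :=
  match st.2 with
  | some g => st.1 ++ [g]
  | none => st.1

theorem pvSweepMain (vs : List String) (lst : List String) :
    ∀ (done : List (String × List Int)) (cv : String) (cur : List Int),
    (∀ v ∈ vs, v ≠ cv) → vs.Pairwise (· ≠ ·) →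
    (∀ v ∈ vs, pvGrp lst v ≠ []) →
    pvFinish ((vs.flatMap (fun v => (pvGrp lst v).map (fun i => (v, i)))).foldl
        pvSweepStep (done, some (cv, cur)))
      = done ++ [(cv, cur)] ++ vs.map (fun v => (v, pvGrp lst v)) := by
  induction vs with
  | nil => intro done cv cur _ _ _; simp [pvFinish]
  | cons v rest ih =>
    intro done cv cur hne hnd hnz
    obtain ⟨i, is, hgrp⟩ : ∃ i is, pvGrp lst v = i :: is := by
      cases h : pvGrp lst v with
      | nil => exact absurd h (hnz v (by simp))
      | cons i is => exact ⟨i, is, rfl⟩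
    simp only [List.flatMap_cons, hgrp, List.map_cons, List.foldl_append, List.foldl_cons]
    have hstep : pvSweepStep (done, some (cv, cur)) (v, i)
        = (done ++ [(cv, cur)], some (v, [i])) := by
      simp [pvSweepStep, (hne v (by simp))]
    rw [hstep, pvSweepGroup]
    have hrec := ih (done ++ [(cv, cur)]) v ([i] ++ is)
      (fun w hw => ((List.pairwise_cons.mp hnd).1 w hw).symm)
      (List.pairwise_cons.mp hnd).2
      (fun w hw => hnz w (by simp [hw]))
    rw [hrec]
    simp

theorem pvGrpNe (lst : List String) (v : String) (hv : v ∈ lst) : pvGrp lst v ≠ [] := by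
  unfold pvGrp
  rw [← pvMapFstSwapped lst] at hv
  obtain ⟨q, hq, hq1⟩ := List.mem_map.mp hv
  intro h
  rw [List.map_eq_nil_iff, List.filter_eq_nil_iff] at h
  exact h q hq (by simpa using hq1)

theorem pvMemValsMemLst (lst : List String) (v : String) (hv : v ∈ pvVals lst) : v ∈ lst := by
  unfold pvVals at hv
  rw [PySem.List.mem_sorted, PySem.Set.mem_ofList] at hv
  exact hv

theorem pvB_canon (lst : List String) : index_mapping_alt lst = pvCanon lst := by
  show pvFinish ((PySem.List.sorted2 (pvSwapped lst) (fun q => q.1) (fun q => q.2) false).foldl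
      pvSweepStep ([], none)) = pvCanon lst
  rw [pvSortedB]
  have hflat : pvFlat lst = (pvVals lst).flatMap (fun v => (pvGrp lst v).map (fun i => (v, i))) :=
    pvFlatMapCongr _ _ _ (fun v _ => pvGroupFilter lst v)
  rw [hflat]
  unfold pvCanon
  cases hvs : pvVals lst with
  | nil => simp [pvFinish]
  | cons v rest =>
    have hpw : (v :: rest).Pairwise (· < ·) := hvs ▸ pvValsPairwise lst
    have hmem : ∀ w ∈ v :: rest, w ∈ lst := fun w hw =>
      pvMemValsMemLst lst w (hvs ▸ hw)
    obtain ⟨i, is, hgrp⟩ : ∃ i is, pvGrp lst v = i :: is := by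
      cases h : pvGrp lst v with
      | nil => exact absurd h (pvGrpNe lst v (hmem v (by simp)))
      | cons i is => exact ⟨i, is, rfl⟩
    simp only [List.flatMap_cons, hgrp, List.map_cons, List.foldl_append, List.foldl_cons]
    have hstep : pvSweepStep ([], none) (v, i) = ([], some (v, [i])) := by
      simp [pvSweepStep]
    rw [hstep, pvSweepGroup]
    have hrec := pvSweepMain rest lst [] v ([i] ++ is)
      (fun w hw => (ne_of_gt ((List.pairwise_cons.mp hpw).1 w hw)))
      ((List.pairwise_cons.mp hpw).2.imp ne_of_lt)
      (fun w hw => pvGrpNe lst w (hmem w (by simp [hw])))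
    rw [hrec]
    simp

-- ===== VERDICT (by name: the statement is the Claim_ definition above) =====
theorem index_mapping_spec : Claim_equal_index_mapping := by
  intro lst _
  unfold Spec_index_mapping
  rw [pvA_canon, pvB_canon]
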